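-- pv_equiv track=rewrite | github.com/Mzilakatha11/Student-Career | app.py | calculate_aps
-- ===== SOURCE A (Python) =====
-- def calculate_aps(marks):
--     """Calculate APS points based on the student's marks."""
--     aps = 0
--     for mark in marks:
--         if mark >= 80:
--             aps += 7
--         elif mark >= 70:
--             aps += 6
--         elif mark >= 60:
--             aps += 5
--         elif mark >= 50:
--             aps += 4
--         elif mark >= 40:
--             aps += 3
--         elif mark >= 30:
--             aps += 2
--         else:
--             aps += 0
--     return aps
-- ===== SOURCE B (Python) =====
-- def calculate_aps(marks):
--     """Calculate APS points based on the student's marks."""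
--     # APS of one mark = number of thresholds in (30,40,50,60,70,80) it meets,
--     # with the bottom threshold 30 counted twice (30..39 -> 2, each further
--     # decade up to 80 adds 1). So sum per-threshold counts over the list.
--     total = 2 * sum(1 for m in marks if m >= 30)
--     for t in (40, 50, 60, 70, 80):
--         total += sum(1 for m in marks if m >= t)
--     return total
-- ===== Notes on version B (the rewrite author's own statement) =====
-- stated objective: alternative
-- what changed: Replaces the per-mark first-match branch cascade with indicator counting: one counting pass per threshold (the >=30 count weighted 2), summing how many thresholds each mark meets instead of selecting a branch per mark.
import Mathlib
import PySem

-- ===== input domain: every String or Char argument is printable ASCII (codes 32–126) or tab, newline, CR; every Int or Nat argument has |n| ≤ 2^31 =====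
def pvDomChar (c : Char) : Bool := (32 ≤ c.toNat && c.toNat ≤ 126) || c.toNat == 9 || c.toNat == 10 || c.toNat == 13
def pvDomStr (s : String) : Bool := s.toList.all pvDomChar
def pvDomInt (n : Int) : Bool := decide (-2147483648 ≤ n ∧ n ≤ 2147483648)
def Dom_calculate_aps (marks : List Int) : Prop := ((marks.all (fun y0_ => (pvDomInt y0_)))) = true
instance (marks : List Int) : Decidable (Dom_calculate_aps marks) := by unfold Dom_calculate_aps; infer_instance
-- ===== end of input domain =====

-- ===== PORT A =====
-- B replaces the per-mark branch cascade with per-threshold counting passes (alternative; same cost).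
def calculate_aps (marks : List Int) : Int :=
  marks.foldl (fun aps mark =>
    if mark ≥ 80 then aps + 7
    else if mark ≥ 70 then aps + 6
    else if mark ≥ 60 then aps + 5
    else if mark ≥ 50 then aps + 4
    else if mark ≥ 40 then aps + 3
    else if mark ≥ 30 then aps + 2
    else aps + 0) 0

-- ===== PORT B =====
-- port of Python's sum(1 for m in marks if m >= t)
def countGe (t : Int) : List Int → Int
  | [] => 0
  | m :: rest => (if m ≥ t then 1 else 0) + countGe t rest

def calculate_aps_alt (marks : List Int) : Int :=
  ([40, 50, 60, 70, 80] : List Int).foldl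
    (fun total t => total + countGe t marks)
    (2 * countGe 30 marks)

-- ===== PRECONDITION & SPEC =====
def Spec_calculate_aps (marks : List Int) (out : Int) : Prop := out = calculate_aps_alt marks
instance (marks : List Int) (out : Int) : Decidable (Spec_calculate_aps marks out) := by unfold Spec_calculate_aps; infer_instance

-- ===== CLAIM (what is proved, stated in full; the proofs are below) =====
def Claim_equal_calculate_aps : Prop := ∀ (marks : List Int), Dom_calculate_aps marks → Spec_calculate_aps marks (calculate_aps marks)

-- ===== LEMMAS AND PROOFS =====

theorem foldl_counts (marks : List Int) (a : Int) :
    marks.foldl (fun aps mark =>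
      if mark ≥ 80 then aps + 7
      else if mark ≥ 70 then aps + 6
      else if mark ≥ 60 then aps + 5
      else if mark ≥ 50 then aps + 4
      else if mark ≥ 40 then aps + 3
      else if mark ≥ 30 then aps + 2
      else aps + 0) a
      = a + 2 * countGe 30 marks + countGe 40 marks + countGe 50 marks
          + countGe 60 marks + countGe 70 marks + countGe 80 marks := by
  induction marks generalizing a with
  | nil => simp [countGe]
  | cons m t ih =>
    rw [List.foldl_cons, ih]
    simp only [countGe]
    split_ifs <;> omega

-- ===== VERDICT (by name: the statement is the Claim_ definition above) =====
theorem calculate_aps_spec : Claim_equal_calculate_aps := by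
  intro marks _
  unfold Spec_calculate_aps calculate_aps calculate_aps_alt
  rw [foldl_counts]
  simp only [List.foldl_cons, List.foldl_nil]
  ring
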